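-- pv_equiv track=rewrite | github.com/jrszilard/sticker-maker | lake_sticker/map/icons.py | resolve_icon
-- ===== SOURCE A (Python) =====
-- def resolve_icon(osm_tags, mapping):
--     for key, value in osm_tags.items():
--         specific = f"{key}={value}"
--         if specific in mapping:
--             return mapping[specific]
--     for key in osm_tags:
--         wildcard = f"{key}=*"
--         if wildcard in mapping:
--             return mapping[wildcard]
--     return "pin"
-- ===== SOURCE B (Python) =====
-- def resolve_icon(osm_tags, mapping):
--     first_specific = None
--     first_wildcard = None
--     for key, value in osm_tags.items():
--         if first_specific is None:
--             first_specific = mapping.get(f"{key}={value}")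
--         if first_wildcard is None:
--             first_wildcard = mapping.get(f"{key}=*")
--     if first_specific is not None:
--         return first_specific
--     if first_wildcard is not None:
--         return first_wildcard
--     return "pin"
-- ===== Notes on version B (the rewrite author's own statement) =====
-- stated objective: alternative
-- what changed: Replaces A's two sequential passes over osm_tags with a single pass that accumulates the first specific match and the first wildcard match in two Option variables, deciding specific-before-wildcard only after the loop.
import Mathlib
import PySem

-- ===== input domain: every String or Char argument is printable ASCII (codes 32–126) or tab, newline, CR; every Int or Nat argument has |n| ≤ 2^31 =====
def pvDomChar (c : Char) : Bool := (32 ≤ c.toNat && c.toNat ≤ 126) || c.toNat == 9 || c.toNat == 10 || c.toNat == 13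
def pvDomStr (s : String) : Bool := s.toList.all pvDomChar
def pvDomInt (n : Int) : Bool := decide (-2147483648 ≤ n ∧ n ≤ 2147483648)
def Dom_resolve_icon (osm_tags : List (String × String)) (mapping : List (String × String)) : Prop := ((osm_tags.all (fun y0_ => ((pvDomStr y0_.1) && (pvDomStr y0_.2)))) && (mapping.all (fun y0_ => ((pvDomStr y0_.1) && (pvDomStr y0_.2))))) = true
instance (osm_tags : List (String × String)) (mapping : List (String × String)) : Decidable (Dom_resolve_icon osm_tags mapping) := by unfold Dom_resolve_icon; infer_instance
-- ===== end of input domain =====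

-- B replaces A's two sequential passes with a single pass keeping two Option accumulators (alternative decomposition, same cost).


-- ===== PORT A =====
-- first pass: for key, value in osm_tags.items(): if f"{key}={value}" in mapping: return mapping[...]
def riSpecificPass (osm_tags : List (String × String)) (mapping : List (String × String)) : Option String :=
  match osm_tags with
  | [] => none
  | (k, v) :: rest =>
    match mapping.lookup (k ++ "=" ++ v) with
    | some r => some r
    | none => riSpecificPass rest mapping

-- second pass: for key in osm_tags: if f"{key}=*" in mapping: return mapping[...]
def riWildcardPass (osm_tags : List (String × String)) (mapping : List (String × String)) : Option String :=
  match osm_tags with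
  | [] => none
  | (k, _) :: rest =>
    match mapping.lookup (k ++ "=*") with
    | some r => some r
    | none => riWildcardPass rest mapping

def resolve_icon (osm_tags : List (String × String)) (mapping : List (String × String)) : String :=
  match riSpecificPass osm_tags mapping with
  | some r => r
  | none =>
    match riWildcardPass osm_tags mapping with
    | some r => r
    | none => "pin"

-- ===== PORT B =====
-- single loop: fold over osm_tags keeping (first_specific, first_wildcard); decide priority after the loop
def resolve_icon_alt (osm_tags : List (String × String)) (mapping : List (String × String)) : String :=
  let st := osm_tags.foldl
    (fun (st : Option String × Option String) kv =>
      ((match st.1 with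
        | some r => some r
        | none => mapping.lookup (kv.1 ++ "=" ++ kv.2)),
       (match st.2 with
        | some r => some r
        | none => mapping.lookup (kv.1 ++ "=*"))))
    (none, none)
  match st.1 with
  | some r => r
  | none =>
    match st.2 with
    | some r => r
    | none => "pin"

-- ===== PRECONDITION & SPEC =====
def Spec_resolve_icon (osm_tags : List (String × String)) (mapping : List (String × String)) (out : String) : Prop := out = resolve_icon_alt osm_tags mapping
instance (osm_tags : List (String × String)) (mapping : List (String × String)) (out : String) : Decidable (Spec_resolve_icon osm_tags mapping out) := by unfold Spec_resolve_icon; infer_instance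

-- ===== CLAIM (what is proved, stated in full; the proofs are below) =====
def Claim_equal_resolve_icon : Prop := ∀ (osm_tags : List (String × String)) (mapping : List (String × String)), Dom_resolve_icon osm_tags mapping → Spec_resolve_icon osm_tags mapping (resolve_icon osm_tags mapping)

-- ===== LEMMAS AND PROOFS =====
-- loop invariant: B's fold started from (a, b) computes a-else-first-specific and b-else-first-wildcard
theorem riFold_inv (osm_tags mapping : List (String × String)) (a b : Option String) :
    osm_tags.foldl
      (fun (st : Option String × Option String) kv =>
        ((match st.1 with
          | some r => some r
          | none => mapping.lookup (kv.1 ++ "=" ++ kv.2)),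
         (match st.2 with
          | some r => some r
          | none => mapping.lookup (kv.1 ++ "=*")))) (a, b)
    = ((match a with
        | some r => some r
        | none => riSpecificPass osm_tags mapping),
       (match b with
        | some r => some r
        | none => riWildcardPass osm_tags mapping)) := by
  induction osm_tags generalizing a b with
  | nil => cases a <;> cases b <;> simp [riSpecificPass, riWildcardPass]
  | cons kv rest ih =>
    obtain ⟨k, v⟩ := kv
    simp only [List.foldl_cons, ih]
    cases a <;> cases b <;> simp [riSpecificPass, riWildcardPass]

-- ===== VERDICT (by name: the statement is the Claim_ definition above) =====
theorem resolve_icon_spec : Claim_equal_resolve_icon := by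
  intro osm_tags mapping _
  unfold Spec_resolve_icon resolve_icon resolve_icon_alt
  rw [riFold_inv]
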